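-- pv_equiv track=rewrite | github.com/Gholliday98/amazon_fix | pc_synonym_library (3).py | clean_and_trim_backend_terms
-- ===== SOURCE A (Python) =====
-- PROHIBITED_TERMS = [
--     'best', 'top', 'guaranteed', 'free shipping',
--     'sale', 'discount', 'cheap', 'cheapest',
--     'lowest price', 'best price', 'number one', '#1',
--     'amazing', 'awesome', 'excellent',
--     # Competitor brand names
--     'eplastics', 'cope plastics', 'piedmont plastics',
--     'professional plastics', 'interstate plastics',
--     'mcmaster', 'grainger', 'amazon',
-- ]
--
-- def clean_and_trim_backend_terms(terms_list, title_words, max_bytes=249):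
--     """
--     Clean backend terms:
--     - Remove words already in title
--     - Remove prohibited terms
--     - Trim to max_bytes
--     - Return as space-separated string
--     """
--     # Flatten title words for comparison
--     title_lower = set(title_words.lower().split())
--
--     # Clean terms
--     cleaned = []
--     for term in terms_list:
--         term_lower = term.lower().strip()
--
--         # Skip if prohibited
--         if any(p in term_lower for p in PROHIBITED_TERMS):
--             continue
--
--         # Skip if all words already in title
--         term_words = set(term_lower.split())
--         if term_words.issubset(title_lower):
--             continue
--
--         cleaned.append(term_lower)
--
--     # Remove duplicates while preserving order
--     seen = set()
--     unique = []
--     for t in cleaned: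
--         if t not in seen:
--             seen.add(t)
--             unique.append(t)
--
--     # Build string within byte limit
--     result = []
--     current_bytes = 0
--
--     for term in unique:
--         term_bytes = len(term.encode('utf-8')) + 1  # +1 for space
--         if current_bytes + term_bytes <= max_bytes:
--             result.append(term)
--             current_bytes += term_bytes
--         else:
--             break
--
--     return ' '.join(result)
-- ===== SOURCE B (Python) =====
-- PROHIBITED_TERMS = [
--     'best', 'top', 'guaranteed', 'free shipping',
--     'sale', 'discount', 'cheap', 'cheapest',
--     'lowest price', 'best price', 'number one', '#1',
--     'amazing', 'awesome', 'excellent',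
--     'eplastics', 'cope plastics', 'piedmont plastics',
--     'professional plastics', 'interstate plastics',
--     'mcmaster', 'grainger', 'amazon',
-- ]
--
--
-- def clean_and_trim_backend_terms(terms_list, title_words, max_bytes=249):
--     """Single pass: filter, dedup and byte-trim fused into one loop."""
--     title_lower = set(title_words.lower().split())
--     seen = set()
--     result = []
--     current_bytes = 0
--     for term in terms_list:
--         t = term.lower().strip()
--         if any(p in t for p in PROHIBITED_TERMS):
--             continue
--         if set(t.split()).issubset(title_lower):
--             continue
--         if t in seen:
--             continue
--         seen.add(t)
--         cost = len(t.encode('utf-8')) + 1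
--         if current_bytes + cost > max_bytes:
--             break
--         result.append(t)
--         current_bytes += cost
--     return ' '.join(result)
-- ===== Notes on version B (the rewrite author's own statement) =====
-- stated objective: simpler
-- what changed: A's three sequential passes (filter into 'cleaned', ordered dedup into 'unique', then byte-trim with break) are fused into a single loop over terms_list that maintains the seen-set and the running byte count together and breaks as soon as a new term would exceed the budget.
import Mathlib
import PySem

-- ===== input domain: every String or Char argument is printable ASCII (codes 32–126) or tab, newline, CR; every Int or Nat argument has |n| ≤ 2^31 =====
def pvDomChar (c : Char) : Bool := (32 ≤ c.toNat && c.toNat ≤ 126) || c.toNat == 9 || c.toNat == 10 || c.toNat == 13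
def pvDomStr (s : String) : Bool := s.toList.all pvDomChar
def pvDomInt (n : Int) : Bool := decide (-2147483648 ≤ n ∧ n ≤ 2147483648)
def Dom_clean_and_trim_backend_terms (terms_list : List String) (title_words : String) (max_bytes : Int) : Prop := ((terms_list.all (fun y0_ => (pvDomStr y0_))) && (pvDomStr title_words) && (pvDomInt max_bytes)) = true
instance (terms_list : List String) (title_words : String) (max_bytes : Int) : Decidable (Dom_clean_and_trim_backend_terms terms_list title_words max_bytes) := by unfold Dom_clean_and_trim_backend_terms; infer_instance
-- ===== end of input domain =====

-- B fuses A's three passes (filter, ordered dedup, byte-trim) into one loop; objective: simpler (one traversal, one accumulator set).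
-- On the ASCII domain len(t.encode('utf-8')) = len(t), ported as PySem.Str.len.

-- ===== PORT A =====
def PROHIBITED_TERMS : List String := [
  "best", "top", "guaranteed", "free shipping",
  "sale", "discount", "cheap", "cheapest",
  "lowest price", "best price", "number one", "#1",
  "amazing", "awesome", "excellent",
  "eplastics", "cope plastics", "piedmont plastics",
  "professional plastics", "interstate plastics",
  "mcmaster", "grainger", "amazon"]

-- the third loop of A: 'for term in unique: … else: break'
def aTrim (max_bytes : Int) : List String → Int → List String → List String
  | [], _, result => result
  | term :: rest, current_bytes, result =>
      let term_bytes := PySem.Str.len term + 1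
      if current_bytes + term_bytes ≤ max_bytes then
        aTrim max_bytes rest (current_bytes + term_bytes) (result ++ [term])
      else result

def clean_and_trim_backend_terms (terms_list : List String) (title_words : String) (max_bytes : Int) : String :=
  let title_lower : PySem.Set String := PySem.Set.ofList (PySem.Str.split₀ (PySem.Str.lower title_words))
  -- first loop: cleaned
  let cleaned : List String := terms_list.foldl (fun cleaned term =>
      let term_lower := PySem.Str.strip (PySem.Str.lower term)
      if PROHIBITED_TERMS.any (fun p => PySem.Str.isIn p term_lower) then cleaned
      else
        let term_words : PySem.Set String := PySem.Set.ofList (PySem.Str.split₀ term_lower)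
        if PySem.Set.issubset term_words title_lower then cleaned
        else cleaned ++ [term_lower]) []
  -- second loop: dedup preserving order
  let su : PySem.Set String × List String := cleaned.foldl (fun su t =>
      if PySem.Set.contains su.1 t then su else (PySem.Set.add su.1 t, su.2 ++ [t])) (PySem.Set.empty, [])
  -- third loop: trim to max_bytes
  let result := aTrim max_bytes su.2 0 []
  PySem.Str.join " " result

-- ===== PORT B =====
-- the single fused loop of B ('break' returns the accumulated result)
def bLoop (title_lower : PySem.Set String) (max_bytes : Int) :
    List String → PySem.Set String → Int → List String → List String
  | [], _, _, result => result
  | term :: rest, seen, current_bytes, result =>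
      let t := PySem.Str.strip (PySem.Str.lower term)
      if PROHIBITED_TERMS.any (fun p => PySem.Str.isIn p t) then
        bLoop title_lower max_bytes rest seen current_bytes result
      else if PySem.Set.issubset (PySem.Set.ofList (PySem.Str.split₀ t)) title_lower then
        bLoop title_lower max_bytes rest seen current_bytes result
      else if PySem.Set.contains seen t then
        bLoop title_lower max_bytes rest seen current_bytes result
      else
        let seen' := PySem.Set.add seen t
        let cost := PySem.Str.len t + 1
        if current_bytes + cost > max_bytes then result
        else bLoop title_lower max_bytes rest seen' (current_bytes + cost) (result ++ [t])

def clean_and_trim_backend_terms_alt (terms_list : List String) (title_words : String) (max_bytes : Int) : String :=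
  let title_lower : PySem.Set String := PySem.Set.ofList (PySem.Str.split₀ (PySem.Str.lower title_words))
  PySem.Str.join " " (bLoop title_lower max_bytes terms_list PySem.Set.empty 0 [])

-- ===== PRECONDITION & SPEC =====
def Spec_clean_and_trim_backend_terms (terms_list : List String) (title_words : String) (max_bytes : Int) (out : String) : Prop := out = clean_and_trim_backend_terms_alt terms_list title_words max_bytes
instance (terms_list : List String) (title_words : String) (max_bytes : Int) (out : String) : Decidable (Spec_clean_and_trim_backend_terms terms_list title_words max_bytes out) := by unfold Spec_clean_and_trim_backend_terms; infer_instance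

-- ===== CLAIM (what is proved, stated in full; the proofs are below) =====
def Claim_equal_clean_and_trim_backend_terms : Prop := ∀ (terms_list : List String) (title_words : String) (max_bytes : Int), Dom_clean_and_trim_backend_terms terms_list title_words max_bytes → Spec_clean_and_trim_backend_terms terms_list title_words max_bytes (clean_and_trim_backend_terms terms_list title_words max_bytes)

-- ===== LEMMAS AND PROOFS =====

-- cons-form characterisation of A's first loop
def cleanF (title_lower : PySem.Set String) : List String → List String
  | [] => []
  | term :: rest =>
      let t := PySem.Str.strip (PySem.Str.lower term)
      if PROHIBITED_TERMS.any (fun p => PySem.Str.isIn p t) then cleanF title_lower rest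
      else if PySem.Set.issubset (PySem.Set.ofList (PySem.Str.split₀ t)) title_lower then cleanF title_lower rest
      else t :: cleanF title_lower rest

-- cons-form characterisation of A's dedup loop
def dd (seen : PySem.Set String) : List String → List String
  | [] => []
  | t :: rest => if PySem.Set.contains seen t then dd seen rest else t :: dd (PySem.Set.add seen t) rest

theorem clean_foldl_eq (title_lower : PySem.Set String) (l : List String) (acc : List String) :
    l.foldl (fun cleaned term =>
      let term_lower := PySem.Str.strip (PySem.Str.lower term)
      if PROHIBITED_TERMS.any (fun p => PySem.Str.isIn p term_lower) then cleaned
      else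
        let term_words : PySem.Set String := PySem.Set.ofList (PySem.Str.split₀ term_lower)
        if PySem.Set.issubset term_words title_lower then cleaned
        else cleaned ++ [term_lower]) acc = acc ++ cleanF title_lower l := by
  induction l generalizing acc with
  | nil => simp [cleanF]
  | cons term rest ih =>
      simp only [List.foldl_cons, cleanF]
      split_ifs with h1 h2
      · exact ih acc
      · exact ih acc
      · rw [ih (acc ++ [PySem.Str.strip (PySem.Str.lower term)]), List.append_assoc]
        rfl

theorem dedup_foldl_eq (l : List String) (seen : PySem.Set String) (acc : List String) :
    (l.foldl (fun su t =>
      if PySem.Set.contains su.1 t then su else (PySem.Set.add su.1 t, su.2 ++ [t])) (seen, acc)).2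
    = acc ++ dd seen l := by
  induction l generalizing seen acc with
  | nil => simp [dd]
  | cons t rest ih =>
      simp only [List.foldl_cons, dd]
      split_ifs with h
      · exact ih seen acc
      · rw [ih (PySem.Set.add seen t) (acc ++ [t]), List.append_assoc]
        rfl

theorem bLoop_eq_trim (title_lower : PySem.Set String) (max_bytes : Int) (l : List String)
    (seen : PySem.Set String) (cur : Int) (res : List String) :
    bLoop title_lower max_bytes l seen cur res
      = aTrim max_bytes (dd seen (cleanF title_lower l)) cur res := by
  induction l generalizing seen cur res with
  | nil => simp [bLoop, cleanF, dd, aTrim]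
  | cons term rest ih =>
      simp only [bLoop, cleanF]
      split_ifs with h1 h2 h3 h4
      · exact ih seen cur res
      · exact ih seen cur res
      · rw [dd, if_pos h3]
        exact ih seen cur res
      · -- new term, over budget: A's trim also stops at it
        rw [dd, if_neg h3, aTrim, if_neg (by omega)]
      · rw [dd, if_neg h3, aTrim, if_pos (by omega)]
        exact ih _ _ _

-- ===== VERDICT (by name: the statement is the Claim_ definition above) =====
theorem clean_and_trim_backend_terms_spec : Claim_equal_clean_and_trim_backend_terms := by
  intro terms_list title_words max_bytes _
  unfold Spec_clean_and_trim_backend_terms clean_and_trim_backend_terms clean_and_trim_backend_terms_alt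
  simp only [clean_foldl_eq, dedup_foldl_eq, bLoop_eq_trim, List.nil_append]
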